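-- pv_equiv track=rewrite | github.com/Unigalactix/jobpilot | jobpilot/ai_engine.py | _replace_section_in_output
-- ===== SOURCE A (Python) =====
-- def _replace_section_in_output(output: str, header: str, replacement: str) -> str:
--     """Replace whatever the AI wrote for a section with the real content."""
--     lines = output.split("\n")
--     result = []
--     skip = False
--     header_up = header.upper()
--     inserted = False
--     for line in lines:
--         stripped = line.strip().upper()
--         is_header = stripped == header_up or stripped.startswith(header_up + " ")
--         if is_header and not inserted:
--             # Insert real section instead
--             result.append(replacement)
--             result.append("")
--             skip = True
--             inserted = True
--             continue
--         if skip: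
--             # Skip lines until the next section header
--             if stripped and all(c.isupper() or not c.isalpha() for c in stripped) and len(stripped) > 3 and stripped != stripped.lower():
--                 skip = False
--                 result.append(line)
--             continue
--         result.append(line)
--     if not inserted:
--         # Section wasn't found — append it
--         result.append("")
--         result.append(replacement)
--     return "\n".join(result)
-- ===== SOURCE B (Python) =====
-- def _replace_section_in_output(output: str, header: str, replacement: str) -> str:
--     """Replace whatever the AI wrote for a section with the real content.
--
--     Slicing formulation: locate the first header line, then the next section
--     heading after it, and splice the pieces together."""
--     lines = output.split("\n")
--     hdr = header.upper()
--
--     def is_header(line):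
--         s = line.strip().upper()
--         return s == hdr or s.startswith(hdr + " ")
--
--     def is_next_section(line):
--         s = line.strip()
--         return len(s) > 3 and any(c.isalpha() for c in s)
--
--     i = next((k for k, l in enumerate(lines) if is_header(l)), None)
--     if i is None:
--         return "\n".join(lines + ["", replacement])
--     j = next((k for k in range(i + 1, len(lines)) if is_next_section(lines[k])), None)
--     tail = lines[j:] if j is not None else []
--     return "\n".join(lines[:i] + [replacement, ""] + tail)
-- ===== Notes on version B (the rewrite author's own statement) =====
-- stated objective: simpler
-- what changed: Replaces A's stateful skip/inserted accumulator loop by a stateless decomposition: find the index of the first header line, find the index of the next section heading after it (simplified, on ASCII, to 'stripped length > 3 and contains a letter'), and splice the line list by slicing.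
import Mathlib
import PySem

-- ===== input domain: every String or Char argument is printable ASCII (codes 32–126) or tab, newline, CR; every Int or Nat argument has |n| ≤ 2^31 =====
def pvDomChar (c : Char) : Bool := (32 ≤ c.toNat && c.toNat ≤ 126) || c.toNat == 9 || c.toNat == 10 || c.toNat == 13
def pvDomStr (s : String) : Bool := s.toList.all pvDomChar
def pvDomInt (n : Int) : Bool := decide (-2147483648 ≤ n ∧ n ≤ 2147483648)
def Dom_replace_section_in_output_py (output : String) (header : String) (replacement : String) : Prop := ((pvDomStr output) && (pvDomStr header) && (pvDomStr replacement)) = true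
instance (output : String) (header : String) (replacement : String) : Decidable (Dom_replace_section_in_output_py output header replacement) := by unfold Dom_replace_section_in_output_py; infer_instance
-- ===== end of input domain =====

-- B replaces A's stateful skip/inserted line loop by a find-the-two-indices-and-splice decomposition (objective: simpler; same linear cost).

-- ===== PORT A =====
-- A's for-loop over lines with state (skip, inserted); the trailing 'if not inserted: append "" and replacement' is the [] case
def pvLoopA (hdrUp repl : List Char) : List (List Char) → Bool → Bool → List (List Char)
  | [], _, inserted => if inserted then [] else [[], repl]
  | line :: ls, skip, inserted =>
    let stripped := PySem.Chars.upper (PySem.Chars.strip line)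
    let is_header := stripped == hdrUp || PySem.Chars.startswith stripped (hdrUp ++ [' '])
    if is_header && !inserted then
      repl :: [] :: pvLoopA hdrUp repl ls true true
    else if skip then
      if (!stripped.isEmpty) && stripped.all (fun c => PySem.Chars.isupper c || !PySem.Chars.isalpha c)
          && decide (stripped.length > 3) && !(stripped == PySem.Chars.lower stripped) then
        line :: pvLoopA hdrUp repl ls false inserted
      else
        pvLoopA hdrUp repl ls skip inserted
    else
      line :: pvLoopA hdrUp repl ls skip inserted

def replace_section_in_output_py (output : String) (header : String) (replacement : String) : String :=
  let lines := PySem.Chars.splitOn output.toList ['\n']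
  let hdrUp := PySem.Chars.upper header.toList
  String.ofList (PySem.Chars.join ['\n'] (pvLoopA hdrUp replacement.toList lines false false))

-- ===== PORT B =====
def pvIsHeaderB (hdrUp : List Char) (line : List Char) : Bool :=
  let s := PySem.Chars.upper (PySem.Chars.strip line)
  s == hdrUp || PySem.Chars.startswith s (hdrUp ++ [' '])

-- on the ASCII domain this is Source B's "len(s) > 3 and any(c.isalpha() for c in s)"
def pvIsNextSectionB (line : List Char) : Bool :=
  let s := PySem.Chars.strip line
  decide (s.length > 3) && s.any PySem.Chars.isalpha

def replace_section_in_output_py_alt (output : String) (header : String) (replacement : String) : String :=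
  let lines := PySem.Chars.splitOn output.toList ['\n']
  let hdrUp := PySem.Chars.upper header.toList
  let repl := replacement.toList
  String.ofList (PySem.Chars.join ['\n'] (
    match lines.findIdx? (pvIsHeaderB hdrUp) with
    | none => lines ++ [[], repl]
    | some i =>
      match (lines.drop (i + 1)).findIdx? pvIsNextSectionB with
      | none => lines.take i ++ [repl, []]
      | some j => lines.take i ++ [repl, []] ++ (lines.drop (i + 1)).drop j))

-- ===== PRECONDITION & SPEC =====
def Spec_replace_section_in_output_py (output : String) (header : String) (replacement : String) (out : String) : Prop := out = replace_section_in_output_py_alt output header replacement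
instance (output : String) (header : String) (replacement : String) (out : String) : Decidable (Spec_replace_section_in_output_py output header replacement out) := by unfold Spec_replace_section_in_output_py; infer_instance

-- ===== CLAIM (what is proved, stated in full; the proofs are below) =====
def Claim_equal_replace_section_in_output_py : Prop := ∀ (output : String) (header : String) (replacement : String), Dom_replace_section_in_output_py output header replacement → Spec_replace_section_in_output_py output header replacement (replace_section_in_output_py output header replacement)

-- ===== LEMMAS AND PROOFS =====
theorem pv_char_le_iff (a b : Char) : a ≤ b ↔ a.toNat ≤ b.toNat := ⟨fun h => Fin.mk_le_mk.mp h, fun h => Fin.mk_le_mk.mpr h⟩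
theorem pv_char_eq_iff (a b : Char) : a = b ↔ a.toNat = b.toNat := ⟨fun h => by rw [h], fun h => Char.ext (UInt32.toNat_inj.mp h)⟩
theorem pv_toNat_ofNat (n : Nat) (h : n.isValidChar) : (Char.ofNat n).toNat = n := by
  unfold Char.ofNat; rw [dif_pos h]; exact Char.toNat_ofNatAux h

theorem pv_islower_iff (c : Char) : PySem.Chars.islower c = true ↔ 97 ≤ c.toNat ∧ c.toNat ≤ 122 := by
  simp [PySem.Chars.islower, pv_char_le_iff, show ('a').toNat = 97 from rfl, show ('z').toNat = 122 from rfl]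
theorem pv_isupper_iff (c : Char) : PySem.Chars.isupper c = true ↔ 65 ≤ c.toNat ∧ c.toNat ≤ 90 := by
  simp [PySem.Chars.isupper, pv_char_le_iff, show ('A').toNat = 65 from rfl, show ('Z').toNat = 90 from rfl]

theorem pv_upperChar_pass (c : Char) :
    (PySem.Chars.isupper (PySem.Chars.upperChar c) || !PySem.Chars.isalpha (PySem.Chars.upperChar c)) = true := by
  simp only [PySem.Chars.upperChar]
  by_cases hl : PySem.Chars.islower c = true
  · rw [if_pos hl]
    rw [pv_islower_iff] at hl
    have hv : (c.toNat - 32).isValidChar := Or.inl (by omega)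
    have hup : PySem.Chars.isupper (Char.ofNat (c.toNat - 32)) = true := by
      rw [pv_isupper_iff, pv_toNat_ofNat _ hv]; omega
    simp [hup]
  · rw [if_neg hl]
    simp only [PySem.Chars.isalpha, Bool.not_eq_true] at hl ⊢
    rw [hl]
    cases PySem.Chars.isupper c <;> simp

theorem pv_lower_upper_ne (c : Char) :
    (PySem.Chars.lowerChar (PySem.Chars.upperChar c) = PySem.Chars.upperChar c) ↔ PySem.Chars.isalpha c = false := by
  simp only [PySem.Chars.upperChar, PySem.Chars.lowerChar]
  by_cases hl : PySem.Chars.islower c = true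
  · rw [if_pos hl]
    have hl' := (pv_islower_iff c).mp hl
    have hv : (c.toNat - 32).isValidChar := Or.inl (by omega)
    have hup : PySem.Chars.isupper (Char.ofNat (c.toNat - 32)) = true := by
      rw [pv_isupper_iff, pv_toNat_ofNat _ hv]; omega
    rw [if_pos hup]
    have hv2 : (c.toNat - 32 + 32).isValidChar := Or.inl (by omega)
    simp only [pv_char_eq_iff, pv_toNat_ofNat _ hv, pv_toNat_ofNat _ hv2,
      PySem.Chars.isalpha, Bool.or_eq_false_iff, hl]
    constructor
    · omega
    · rintro ⟨-, h⟩; exact absurd h (by simp)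
  · rw [if_neg hl]
    simp only [Bool.not_eq_true] at hl
    by_cases hu : PySem.Chars.isupper c = true
    · rw [if_pos hu]
      have hu' := (pv_isupper_iff c).mp hu
      have hv : (c.toNat + 32).isValidChar := Or.inl (by omega)
      simp only [pv_char_eq_iff, pv_toNat_ofNat _ hv, PySem.Chars.isalpha,
        Bool.or_eq_false_iff, hu]
      constructor
      · omega
      · rintro ⟨h, -⟩; exact absurd h (by simp)
    · rw [if_neg hu]
      simp only [Bool.not_eq_true] at hu
      simp [PySem.Chars.isalpha, hu, hl]


theorem pv_heur_eq (line : List Char) :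
    ((!(PySem.Chars.upper (PySem.Chars.strip line)).isEmpty)
      && (PySem.Chars.upper (PySem.Chars.strip line)).all (fun c => PySem.Chars.isupper c || !PySem.Chars.isalpha c)
      && decide ((PySem.Chars.upper (PySem.Chars.strip line)).length > 3)
      && !((PySem.Chars.upper (PySem.Chars.strip line)) == PySem.Chars.lower (PySem.Chars.upper (PySem.Chars.strip line))))
    = pvIsNextSectionB line := by
  simp only [pvIsNextSectionB]
  generalize PySem.Chars.strip line = s
  simp only [PySem.Chars.upper, PySem.Chars.lower, List.map_map]
  have hall : (List.map PySem.Chars.upperChar s).all (fun c => PySem.Chars.isupper c || !PySem.Chars.isalpha c) = true := by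
    simp only [List.all_map, List.all_eq_true]
    intro c _; exact pv_upperChar_pass c
  rw [hall]
  have hne : (!(List.map PySem.Chars.upperChar s == List.map (PySem.Chars.lowerChar ∘ PySem.Chars.upperChar) s)) = s.any PySem.Chars.isalpha := by
    rcases h : s.any PySem.Chars.isalpha with _ | _
    · simp only [List.any_eq_false] at h
      simp only [Bool.not_eq_eq_eq_not, Bool.not_false, beq_iff_eq]
      rw [List.map_eq_map_iff]
      intro x hx
      exact ((pv_lower_upper_ne x).mpr (Bool.eq_false_iff.mpr (h x hx))).symm
    · simp only [List.any_eq_true] at h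
      obtain ⟨x, hx, hax⟩ := h
      simp only [Bool.not_eq_eq_eq_not, Bool.not_true, beq_eq_false_iff_ne, ne_eq]
      rw [List.map_eq_map_iff]
      intro hc
      have := (pv_lower_upper_ne x).mp (hc x hx).symm
      rw [this] at hax; exact absurd hax (by simp)
  rw [hne]
  by_cases h3 : s.length > 3
  · have hni : (List.map PySem.Chars.upperChar s).isEmpty = false := by
      cases s with
      | nil => simp at h3
      | cons a l => simp
    simp [hni, h3]
  · simp [h3]

theorem pvLoopA_done (h r : List Char) (ls : List (List Char)) : pvLoopA h r ls false true = ls := by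
  induction ls with
  | nil => rfl
  | cons a tl ih => simp [pvLoopA, ih]

theorem pvLoopA_skip (h r : List Char) (ls : List (List Char)) :
    pvLoopA h r ls true true =
      (match ls.findIdx? pvIsNextSectionB with
       | none => []
       | some j => ls.drop j) := by
  induction ls with
  | nil => rfl
  | cons a tl ih =>
    rw [List.findIdx?_cons]
    simp only [pvLoopA, Bool.not_true, Bool.and_false, Bool.false_eq_true, if_false, if_pos trivial]
    rw [pv_heur_eq a]
    rcases pvIsNextSectionB a with _ | _
    · rw [if_neg (by simp), ih, if_neg (by simp)]
      cases tl.findIdx? pvIsNextSectionB <;> simp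
    · rw [if_pos (by simp), if_pos (by simp), pvLoopA_done]
      simp

theorem pvLoopA_main (h r : List Char) (ls : List (List Char)) :
    pvLoopA h r ls false false =
      (match ls.findIdx? (pvIsHeaderB h) with
       | none => ls ++ [[], r]
       | some i =>
         match (ls.drop (i + 1)).findIdx? pvIsNextSectionB with
         | none => ls.take i ++ [r, []]
         | some j => ls.take i ++ [r, []] ++ (ls.drop (i + 1)).drop j) := by
  induction ls with
  | nil => rfl
  | cons a tl ih =>
    rw [List.findIdx?_cons]
    simp only [pvLoopA, Bool.not_false, Bool.and_true, pvIsHeaderB]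
    by_cases hh : (PySem.Chars.upper (PySem.Chars.strip a) == h ||
        PySem.Chars.startswith (PySem.Chars.upper (PySem.Chars.strip a)) (h ++ [' '])) = true
    · rw [if_pos hh, if_pos hh, pvLoopA_skip]
      simp only [List.drop_succ_cons, List.drop_zero, List.take_zero, List.nil_append]
      cases tl.findIdx? pvIsNextSectionB <;> simp
    · rw [if_neg hh, if_neg hh, if_neg (by simp), ih]
      cases hf : tl.findIdx? (pvIsHeaderB h) with
      | none => simp
      | some i =>
        simp only [Option.map_some]
        cases hg : (tl.drop (i + 1)).findIdx? pvIsNextSectionB <;> simp [hg, List.drop_succ_cons]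

-- ===== VERDICT (by name: the statement is the Claim_ definition above) =====
theorem replace_section_in_output_py_spec : Claim_equal_replace_section_in_output_py := by
  intro output header replacement _
  unfold Spec_replace_section_in_output_py replace_section_in_output_py replace_section_in_output_py_alt
  simp only [pvLoopA_main]
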